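-- pv_equiv track=rewrite | github.com/990aa/cryptex | src/cryptex/solvers/kpa.py | _check_substitution_pair
-- ===== SOURCE A (Python) =====
-- def _check_substitution_pair(ct: str, pt: str) -> dict[str, str] | None:
--     c2p: dict[str, str] = {}
--     p_used: set[str] = set()
--     for c, p in zip(ct, pt):
--         if c in c2p and c2p[c] != p:
--             return None
--         if c not in c2p and p in p_used:
--             return None
--         c2p[c] = p
--         p_used.add(p)
--     return c2p
-- ===== SOURCE B (Python) =====
-- def _check_substitution_pair(ct: str, pt: str):
--     # Dedup the (c, p) pairs in first-occurrence order, then accept iff the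
--     # distinct pairs form a bijection (unique firsts and unique seconds).
--     pairs = list(dict.fromkeys(zip(ct, pt)))
--     cs = {c for c, _ in pairs}
--     ps = {p for _, p in pairs}
--     if len(cs) == len(pairs) == len(ps):
--         return dict(pairs)
--     return None
-- ===== Notes on version B (the rewrite author's own statement) =====
-- stated objective: alternative
-- what changed: A validates incrementally in one pass over zip(ct, pt), carrying a c2p dict and a p_used set with early returns; B has no validating loop at all: it dedups the (c,p) pairs in first-occurrence order and accepts iff the distinct pairs have as many distinct firsts and distinct seconds as pairs (a bijection), then returns dict(pairs).
import Mathlib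
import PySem

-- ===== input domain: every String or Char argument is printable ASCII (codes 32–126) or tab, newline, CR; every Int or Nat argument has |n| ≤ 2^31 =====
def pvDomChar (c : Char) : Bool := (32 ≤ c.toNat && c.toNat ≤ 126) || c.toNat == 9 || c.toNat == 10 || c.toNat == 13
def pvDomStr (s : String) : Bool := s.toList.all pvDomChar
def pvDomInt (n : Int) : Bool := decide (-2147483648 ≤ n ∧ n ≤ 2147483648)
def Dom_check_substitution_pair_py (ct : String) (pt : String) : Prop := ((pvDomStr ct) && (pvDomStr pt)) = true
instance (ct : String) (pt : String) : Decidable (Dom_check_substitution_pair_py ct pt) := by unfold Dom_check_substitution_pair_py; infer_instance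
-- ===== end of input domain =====

-- B replaces A's single validating pass (c2p dict + p_used set + early returns) by a loop-free
-- aggregate test: dedup the (c,p) pairs and accept iff they have pairwise-distinct firsts and
-- seconds; same cost, entirely different decomposition.

-- the zipped characters as length-1 Python strings (what Python's iteration over str yields)
def pvPairs (ct : String) (pt : String) : List (String × String) :=
  (ct.toList.zip pt.toList).map (fun q => (String.ofList [q.1], String.ofList [q.2]))

-- ===== PORT A =====
-- the for-loop over zip(ct, pt) with early returns, carrying c2p and p_used
def pvA_loop : List (String × String) → PySem.Dict String String → PySem.Set String →
    Option (List (String × String))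
  | [], d, _ => some d.items
  | (c, p) :: rest, d, pu =>
    if d.contains c = true ∧ d.get? c ≠ some p then none
    else if d.contains c = false ∧ p ∈ pu then none
    else pvA_loop rest (d.insert c p) (PySem.Set.add pu p)

def check_substitution_pair_py (ct : String) (pt : String) : Option (List (String × String)) :=
  pvA_loop (pvPairs ct pt) PySem.Dict.empty PySem.Set.empty

-- ===== PORT B =====
def check_substitution_pair_py_alt (ct : String) (pt : String) : Option (List (String × String)) :=
  let pairs := PySem.List.dedup (pvPairs ct pt)
  let cs := PySem.Set.ofList (pairs.map (·.1))
  let ps := PySem.Set.ofList (pairs.map (·.2))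
  if cs.length = pairs.length ∧ pairs.length = ps.length then
    some (PySem.Dict.ofList pairs).items
  else none

-- ===== PRECONDITION & SPEC =====
def Spec_check_substitution_pair_py (ct : String) (pt : String) (out : Option (List (String × String))) : Prop := out = check_substitution_pair_py_alt ct pt
instance (ct : String) (pt : String) (out : Option (List (String × String))) : Decidable (Spec_check_substitution_pair_py ct pt out) := by unfold Spec_check_substitution_pair_py; infer_instance

-- ===== CLAIM (what is proved, stated in full; the proofs are below) =====
def Claim_equal_check_substitution_pair_py : Prop := ∀ (ct : String) (pt : String), Dom_check_substitution_pair_py ct pt → Spec_check_substitution_pair_py ct pt (check_substitution_pair_py ct pt)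

-- ===== LEMMAS AND PROOFS =====

-- B's aggregate test, as a function of the raw pair list
def pvFinish (xs : List (String × String)) : Option (List (String × String)) :=
  let pairs := PySem.List.dedup xs
  let cs := PySem.Set.ofList (pairs.map (·.1))
  let ps := PySem.Set.ofList (pairs.map (·.2))
  if cs.length = pairs.length ∧ pairs.length = ps.length then
    some (PySem.Dict.ofList pairs).items
  else none

theorem pv_ofList_len_eq_iff (xs : List String) :
    (PySem.Set.ofList xs).length = xs.length ↔ xs.Nodup := by
  constructor
  · intro h
    have hsub : (PySem.Set.ofList xs).Sublist xs := by
      rw [PySem.Set.ofList_eq_foldl]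
      have : ∀ (l : List String) (s : List String),
          (l.foldl PySem.Set.add s).Sublist (s ++ l) := by
        intro l
        induction l with
        | nil => simp
        | cons x l ih =>
          intro s
          refine List.Sublist.trans (ih (PySem.Set.add s x)) ?_
          by_cases hx : x ∈ s
          · rw [PySem.Set.add_of_mem hx]
            exact (List.append_sublist_append_left s).mpr (List.sublist_cons_self x l)
          · rw [PySem.Set.add_of_not_mem hx, List.append_assoc]
            simp
      simpa using this xs []
    exact hsub.eq_of_length h ▸ PySem.Set.nodup_ofList xs
  · intro h
    rw [PySem.Set.ofList_eq_self_of_nodup xs h]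

-- two distinct members with the same image kill Nodup of the mapped list
theorem pv_not_nodup_map {α β : Type} (f : α → β) {l : List α} {a b : α}
    (ha : a ∈ l) (hb : b ∈ l) (hne : a ≠ b) (hf : f a = f b) : ¬ (l.map f).Nodup :=
  fun h => hne (List.inj_on_of_nodup_map h ha hb hf)

theorem pvFinish_none_of_clash {xs : List (String × String)}
    (h : ¬ ((PySem.List.dedup xs).map (·.1)).Nodup ∨ ¬ ((PySem.List.dedup xs).map (·.2)).Nodup) :
    pvFinish xs = none := by
  simp only [pvFinish]
  rw [if_neg]
  rintro ⟨h1, h2⟩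
  rcases h with h | h
  · exact h ((pv_ofList_len_eq_iff _).mp (by simpa using h1))
  · exact h ((pv_ofList_len_eq_iff _).mp (by simpa using h2.symm))

-- dedup of (xs ++ x :: ys) drops x when x already occurs in xs
theorem pv_dedup_append_cons_mem {α : Type} [BEq α] [LawfulBEq α]
    (xs ys : List α) (x : α) (hx : x ∈ xs) :
    PySem.List.dedup (xs ++ x :: ys) = PySem.List.dedup (xs ++ ys) := by
  simp only [PySem.List.dedup_eq_ofList, PySem.Set.ofList_eq_foldl, List.foldl_append,
    List.foldl_cons]
  have : PySem.Set.add (List.foldl PySem.Set.add [] xs) x = List.foldl PySem.Set.add [] xs := by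
    apply PySem.Set.add_of_mem
    rw [← PySem.Set.ofList_eq_foldl]
    exact (PySem.Set.mem_ofList xs x).mpr hx
  rw [this]

theorem pv_get?_some_of_contains (d : PySem.Dict String String) (k : String)
    (hc : d.contains k = true) : ∃ w, d.get? k = some w := by
  rcases ho : d.get? k with _ | w
  · rw [(PySem.Dict.get?_eq_none_iff_contains d k).mp ho] at hc
    exact absurd hc (by simp)
  · exact ⟨w, rfl⟩

theorem pv_insert_eq_self (d : PySem.Dict String String) (k v : String)
    (hk : d.keys.Nodup) (h : d.get? k = some v) : d.insert k v = d := by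
  have hc : d.contains k = true := by
    by_contra hc
    rw [(PySem.Dict.get?_eq_none_iff_contains d k).mpr (Bool.not_eq_true _ ▸ hc)] at h
    simp at h
  apply PySem.Dict.ext
  rw [PySem.Dict.items_insert_of_contains d v hc]
  refine (List.map_congr_left (fun p hp => ?_)).trans (List.map_id _)
  by_cases hpk : (p.1 == k) = true
  · have hk1 : p.1 = k := by simpa using hpk
    have hmem : (k, p.2) ∈ d.items := by rw [← hk1]; exact hp
    have : d.get? k = some p.2 := PySem.Dict.get?_of_mem_items d hmem hk
    have hv2 : v = p.2 := by rw [h] at this; exact Option.some.inj this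
    rw [if_pos hpk, hv2, id_eq, ← hk1]
  · simp [hpk]

theorem pv_mem_values_of_get? (d : PySem.Dict String String) (k v : String)
    (h : d.get? k = some v) : v ∈ d.values := by
  simp only [PySem.Dict.get?, Option.map_eq_some_iff] at h
  obtain ⟨p, hp, hv⟩ := h
  exact hv ▸ List.mem_map_of_mem (List.mem_of_find?_eq_some hp)

-- main invariant: A's loop from a state whose items are a partial bijection equals
-- B's aggregate test on (processed items ++ remaining pairs)
theorem pv_main (l : List (String × String)) (d : PySem.Dict String String)
    (hk : (d.items.map (·.1)).Nodup) (hv : (d.items.map (·.2)).Nodup) :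
    pvA_loop l d (d.items.map (·.2)) = pvFinish (d.items ++ l) := by
  induction l generalizing d with
  | nil =>
    have hnd : d.items.Nodup := hk.of_map
    simp only [pvA_loop, pvFinish, List.append_nil,
      PySem.List.dedup_eq_ofList, PySem.Set.ofList_eq_self_of_nodup _ hnd]
    rw [if_pos ⟨((pv_ofList_len_eq_iff _).mpr hk).trans (by simp),
      (((pv_ofList_len_eq_iff _).mpr hv).trans (by simp)).symm⟩]
    congr 1
    have hfresh := PySem.Dict.items_foldl_insert_fresh d.items Prod.fst Prod.snd PySem.Dict.empty
      (fun a _ => PySem.Dict.contains_empty a.1) (by simpa using hk)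
    calc d.items = d.items.map (fun a => (a.1, a.2)) := by simp
      _ = (PySem.Dict.empty : PySem.Dict String String).items ++ d.items.map (fun a => (a.1, a.2)) := rfl
      _ = (List.foldl (fun d a => d.insert a.1 a.2) PySem.Dict.empty d.items).items := hfresh.symm
      _ = (PySem.Dict.ofList d.items).items := rfl
  | cons cp rest ih =>
    obtain ⟨c, p⟩ := cp
    have hkeys : d.keys.Nodup := hk
    simp only [pvA_loop]
    rcases hc : d.contains c with _ | _
    · -- c fresh for c2p
      have hget : d.get? c = none := (PySem.Dict.get?_eq_none_iff_contains d c).mpr hc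
      rw [if_neg (by simp [hget])]
      by_cases hp : p ∈ d.items.map (·.2)
      · -- p already used: A returns None; B finds two distinct pairs with equal seconds
        rw [if_pos ⟨rfl, hp⟩]
        obtain ⟨q, hq, hq2⟩ := List.mem_map.mp hp
        refine (pvFinish_none_of_clash (Or.inr (pv_not_nodup_map (fun x => x.2) (a := q) (b := (c, p)) ?_ ?_ ?_ ?_))).symm
        · exact (PySem.List.mem_dedup _ _).mpr (List.mem_append_left _ hq)
        · exact (PySem.List.mem_dedup _ _).mpr (by simp)
        · intro he
          have hck : c ∈ d.keys := by
            have : q.1 = c := by rw [he]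
            rw [← this]; exact List.mem_map_of_mem hq
          rw [← PySem.Dict.contains_iff_mem_keys, hc] at hck
          exact absurd hck (by simp)
        · exact hq2
      · -- both fresh: extend the state and recurse
        rw [if_neg (by simp [hp])]
        have hitems := PySem.Dict.items_insert_of_not_contains d p hc
        have hk' : ((d.insert c p).items.map (·.1)).Nodup := by
          rw [hitems]
          simp only [List.map_append, List.map_cons, List.map_nil]
          refine List.Nodup.append hk (List.nodup_singleton _) ?_
          intro x hx hmem
          rw [List.mem_singleton] at hmem
          rw [hmem] at hx
          have hck : c ∈ d.keys := hx
          rw [← PySem.Dict.contains_iff_mem_keys, hc] at hck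
          exact absurd hck (by simp)
        have hv' : ((d.insert c p).items.map (·.2)).Nodup := by
          rw [hitems]
          simp only [List.map_append, List.map_cons, List.map_nil]
          refine List.Nodup.append hv (List.nodup_singleton _) ?_
          intro x hx hmem
          rw [List.mem_singleton] at hmem
          subst hmem
          exact hp hx
        have hpu : PySem.Set.add (d.items.map (·.2)) p = (d.insert c p).items.map (·.2) := by
          rw [PySem.Set.add_of_not_mem hp, hitems]
          simp
        rw [hpu, ih _ hk' hv', hitems, List.append_assoc]
        rfl
    · -- c already mapped, to some w
      obtain ⟨w, hw⟩ := pv_get?_some_of_contains d c hc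
      by_cases hwp : w = p
      · -- same image: the step is a no-op on both sides
        subst hwp
        have hpu : PySem.Set.add (d.items.map (·.2)) w = d.items.map (·.2) :=
          PySem.Set.add_of_mem (pv_mem_values_of_get? d c w hw)
        rw [if_neg (by simp [hw]), if_neg (by simp), pv_insert_eq_self d c w hkeys hw,
          hpu, ih d hk hv]
        simp only [pvFinish]
        rw [pv_dedup_append_cons_mem _ _ _ (PySem.Dict.mem_items_of_get?_eq_some d hw)]
      · -- conflicting image: A returns None; B finds two distinct pairs with equal firsts
        rw [if_pos ⟨rfl, by simp [hw, hwp]⟩]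
        refine (pvFinish_none_of_clash (Or.inl (pv_not_nodup_map (fun x => x.1) (a := (c, w)) (b := (c, p)) ?_ ?_ ?_ rfl))).symm
        · exact (PySem.List.mem_dedup _ _).mpr
            (List.mem_append_left _ (PySem.Dict.mem_items_of_get?_eq_some d hw))
        · exact (PySem.List.mem_dedup _ _).mpr (by simp)
        · intro he
          exact hwp (by injection he)

-- ===== VERDICT (by name: the statement is the Claim_ definition above) =====
theorem check_substitution_pair_py_spec : Claim_equal_check_substitution_pair_py := by
  intro ct pt _
  show _ = _
  have h := pv_main (pvPairs ct pt) PySem.Dict.empty List.nodup_nil List.nodup_nil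
  exact h.trans (by rfl)
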